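-- pv_equiv track=rewrite | github.com/oneisnot/ruichangmj | ruichang_mj_sim.py | check_seven_fairies
-- ===== SOURCE A (Python) =====
-- from collections import Counter
--
-- ZHONG = 27
--
-- def is_qing_yi_se(hand, melds):
--     all_tiles = hand + [m[1] for m in melds]
--     if any(t >= ZHONG for t in all_tiles):
--         return False
--     suits = set(t // 9 for t in all_tiles)
--     return len(suits) == 1
--
-- def is_seven_pairs(hand):
--     if len(hand) != 14: return False
--     c = Counter(hand)
--     return all(count in (2, 4) for count in c.values())
--
-- def check_seven_fairies(hand):
--     if not is_seven_pairs(hand): return False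
--     if not is_qing_yi_se(hand, []): return False
--     t_set = sorted(list(set(hand)))
--     if len(t_set) != 7: return False
--     suit = t_set[0] // 9
--     for t in t_set:
--         if t // 9 != suit: return False
--     if t_set[-1] % 9 - t_set[0] % 9 == 6 and len(t_set) == 7:
--         return True
--     return False
-- ===== SOURCE B (Python) =====
-- def check_seven_fairies(hand):
--     if len(hand) != 14:
--         return False
--     s = sorted(hand)
--     t0 = s[0]
--     if t0 >= 27:
--         return False
--     if t0 // 9 != (t0 + 6) // 9:
--         return False
--     expected = [t0 + r for r in range(7) for _ in (0, 1)]
--     return s == expected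
-- ===== Notes on version B (the rewrite author's own statement) =====
-- stated objective: simpler
-- what changed: Replaces A's four-stage pipeline (Counter pair check, qing-yi-se suit-set scan, sorted-dedup length/suit/span checks) by a single sort followed by one equality test against the explicit doubled consecutive run built from the smallest tile, plus the two guards t0 < 27 and t0//9 == (t0+6)//9.
import Mathlib
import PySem

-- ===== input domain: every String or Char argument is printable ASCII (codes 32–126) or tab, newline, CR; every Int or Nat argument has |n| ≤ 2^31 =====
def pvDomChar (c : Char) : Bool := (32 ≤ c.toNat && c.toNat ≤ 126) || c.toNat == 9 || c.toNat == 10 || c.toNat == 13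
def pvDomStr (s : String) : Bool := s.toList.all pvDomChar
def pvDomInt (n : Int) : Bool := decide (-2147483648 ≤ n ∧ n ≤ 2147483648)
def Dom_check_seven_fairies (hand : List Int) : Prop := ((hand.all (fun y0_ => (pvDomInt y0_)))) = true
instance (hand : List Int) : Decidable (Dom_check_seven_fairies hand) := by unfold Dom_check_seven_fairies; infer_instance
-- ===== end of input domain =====

-- B replaces A's Counter/suit-set/dedup pipeline by one sort plus an equality test
-- against the doubled consecutive run starting at the smallest tile (objective: simpler).

-- ===== PORT A =====
def is_qing_yi_se (hand : List Int) (melds : List (Int × Int)) : Bool :=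
  let all_tiles := hand ++ melds.map (fun m => m.2)
  if all_tiles.any (fun t => decide (t ≥ 27)) then false
  else
    let suits := PySem.Set.ofList (all_tiles.map (fun t => PySem.Int.floordiv t 9))
    PySem.Set.len suits == 1

def is_seven_pairs (hand : List Int) : Bool :=
  if hand.length ≠ 14 then false
  else
    (PySem.Dict.counter hand).values.all (fun count => count == 2 || count == 4)

def check_seven_fairies (hand : List Int) : Bool :=
  if !is_seven_pairs hand then false
  else if !is_qing_yi_se hand [] then false
  else
    let t_set := PySem.List.sorted (PySem.Set.ofList hand) (fun x => x) false
    if t_set.length ≠ 7 then false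
    else
      let suit := PySem.Int.floordiv (PySem.List.pyGetD t_set 0 0) 9
      if t_set.any (fun t => decide (PySem.Int.floordiv t 9 ≠ suit)) then false
      else if PySem.Int.mod (PySem.List.pyGetD t_set (-1) 0) 9
                - PySem.Int.mod (PySem.List.pyGetD t_set 0 0) 9 == 6
              && t_set.length == 7 then true
      else false

-- ===== PORT B =====
def check_seven_fairies_alt (hand : List Int) : Bool :=
  if hand.length ≠ 14 then false
  else
    let s := PySem.List.sorted hand (fun x => x) false
    let t0 := PySem.List.pyGetD s 0 0
    if t0 ≥ 27 then false
    else if PySem.Int.floordiv t0 9 ≠ PySem.Int.floordiv (t0 + 6) 9 then false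
    else
      let expected := (PySem.List.pyRange 0 7 1).flatMap (fun r => [t0 + r, t0 + r])
      s == expected

-- ===== PRECONDITION & SPEC =====
def Spec_check_seven_fairies (hand : List Int) (out : Bool) : Prop := out = check_seven_fairies_alt hand
instance (hand : List Int) (out : Bool) : Decidable (Spec_check_seven_fairies hand out) := by unfold Spec_check_seven_fairies; infer_instance

-- ===== CLAIM (what is proved, stated in full; the proofs are below) =====
def Claim_equal_check_seven_fairies : Prop := ∀ (hand : List Int), Dom_check_seven_fairies hand → Spec_check_seven_fairies hand (check_seven_fairies hand)

-- ===== LEMMAS AND PROOFS =====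

-- the sorted dedup run [t0, …, t0+6] and the doubled run [t0, t0, …, t0+6, t0+6]
def pvRun (a : Int) : List Int := [a, a+1, a+2, a+3, a+4, a+5, a+6]
def pvRun2 (a : Int) : List Int := [a, a, a+1, a+1, a+2, a+2, a+3, a+3, a+4, a+4, a+5, a+5, a+6, a+6]

theorem pvExpected_eq (a : Int) :
    (PySem.List.pyRange 0 7 1).flatMap (fun r => [a + r, a + r]) = pvRun2 a := by
  have h : PySem.List.pyRange 0 7 1 = [0,1,2,3,4,5,6] := by decide
  simp [h, List.flatMap, pvRun2]

theorem pvRun2_count (a x : Int) :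
    (pvRun2 a).count x =
      if x = a ∨ x = a+1 ∨ x = a+2 ∨ x = a+3 ∨ x = a+4 ∨ x = a+5 ∨ x = a+6 then 2 else 0 := by
  simp only [pvRun2, List.count_cons, List.count_nil, beq_iff_eq]
  split_ifs <;> omega

-- a nonempty nodup list whose members are all c is [c]
theorem pvNodupConst {c : Int} : ∀ (s : List Int), s.Nodup → s ≠ [] → (∀ x ∈ s, x = c) → s = [c] := by
  intro s hnd hne hall
  match s, hnd, hne with
  | [x], _, _ => simp [hall x (by simp)]
  | x :: y :: t, hnd, _ =>
    exfalso
    have hx := hall x (by simp)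
    have hy := hall y (by simp)
    rw [List.nodup_cons] at hnd
    exact hnd.1 (by rw [hx, hy.symm]; exact List.mem_cons_self)

theorem pvLen7 (l : List Int) (h : l.length = 7) : ∃ a b c d e f g, l = [a,b,c,d,e,f,g] := by
  rcases l with _|⟨a,l⟩; · simp at h
  rcases l with _|⟨b,l⟩; · simp at h
  rcases l with _|⟨c,l⟩; · simp at h
  rcases l with _|⟨d,l⟩; · simp at h
  rcases l with _|⟨e,l⟩; · simp at h
  rcases l with _|⟨f,l⟩; · simp at h
  rcases l with _|⟨g,l⟩; · simp at h
  rcases l with _|⟨x,l⟩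
  · exact ⟨a,b,c,d,e,f,g,rfl⟩
  · simp at h

theorem pvSetLenOne (m : List Int) :
    (PySem.Set.ofList m).length = 1 ↔ m ≠ [] ∧ ∃ q, ∀ x ∈ m, x = q := by
  constructor
  · intro h
    obtain ⟨c, hc⟩ := List.length_eq_one_iff.mp h
    have hne : m ≠ [] := by
      intro h0; subst h0
      exact absurd hc (by simp [PySem.Set.ofList])
    refine ⟨hne, c, fun x hx => ?_⟩
    have : x ∈ PySem.Set.ofList m := (PySem.Set.mem_ofList m x).mpr hx
    rw [hc] at this; simpa using this
  · rintro ⟨hne, q, hq⟩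
    have : PySem.Set.ofList m = [q] := by
      apply pvNodupConst _ (PySem.Set.nodup_ofList m)
      · intro h0
        rcases List.exists_cons_of_ne_nil hne with ⟨a, t, rfl⟩
        have : a ∈ PySem.Set.ofList (a :: t) := (PySem.Set.mem_ofList _ a).mpr (by simp)
        rw [h0] at this; simp at this
      · intro x hx
        exact hq x ((PySem.Set.mem_ofList m x).mp hx)
    rw [this]; rfl

theorem pvSevenPairs_iff (hand : List Int) :
    is_seven_pairs hand = true ↔
      hand.length = 14 ∧ ∀ k ∈ hand, hand.count k = 2 ∨ hand.count k = 4 := by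
  unfold is_seven_pairs
  by_cases h : hand.length ≠ 14
  · simp [h]
  · rw [if_neg h]
    have hv : (PySem.Dict.counter hand).values
        = (PySem.Set.ofList hand).map (fun k => (hand.count k : Int)) := by
      show ((PySem.Dict.counter hand).items).map _ = _
      rw [PySem.Dict.items_counter]
      simp [List.map_map]
    rw [hv, List.all_eq_true]
    constructor
    · intro hall
      refine ⟨by omega, fun k hk => ?_⟩
      have h2 := hall _ (List.mem_map_of_mem ((PySem.Set.mem_ofList hand k).mpr hk))
      simp at h2; omega
    · rintro ⟨-, hc⟩
      intro c hcmem
      rcases List.mem_map.mp hcmem with ⟨k, hk, rfl⟩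
      have := hc k ((PySem.Set.mem_ofList hand k).mp hk)
      simp; omega

theorem pvQing_iff (hand : List Int) :
    is_qing_yi_se hand [] = true ↔
      hand ≠ [] ∧ (∀ t ∈ hand, t < 27) ∧ ∃ q, ∀ t ∈ hand, PySem.Int.floordiv t 9 = q := by
  unfold is_qing_yi_se
  simp only [List.map_nil, List.append_nil]
  by_cases h27 : ∀ t ∈ hand, t < 27
  · rw [if_neg (by
      simp only [List.any_eq_true, decide_eq_true_eq, not_exists, not_and]
      intro t ht
      have := h27 t ht; omega)]
    have hlen : PySem.Set.len (PySem.Set.ofList (hand.map (fun t => PySem.Int.floordiv t 9)))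
        = ((PySem.Set.ofList (hand.map (fun t => PySem.Int.floordiv t 9))).length : Int) := rfl
    rw [beq_iff_eq, hlen, Nat.cast_eq_one, pvSetLenOne]
    constructor
    · rintro ⟨hne, q, hq⟩
      refine ⟨by simpa using hne, h27, q, fun t ht => hq _ (List.mem_map_of_mem ht)⟩
    · rintro ⟨hne, -, q, hq⟩
      refine ⟨by simpa using hne, q, fun x hx => ?_⟩
      rcases List.mem_map.mp hx with ⟨t, ht, rfl⟩
      exact hq t ht
  · have hany : (hand.any fun t => decide (t ≥ 27)) = true := by
      rw [Classical.not_forall] at h27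
      obtain ⟨t, ht⟩ := h27
      rw [List.any_eq_true]
      refine ⟨t, by tauto, by simp; by_contra hc; exact ht (fun _ => by omega)⟩
    rw [if_pos hany]
    constructor
    · intro h; cases h
    · rintro ⟨-, hlt, -⟩
      exact absurd (fun t ht => hlt t ht) h27

-- characterization used by both directions
def pvGood (hand : List Int) (t0 : Int) : Prop :=
  PySem.List.sorted hand (fun x => x) false = pvRun2 t0 ∧ t0 < 27 ∧
    PySem.Int.floordiv t0 9 = PySem.Int.floordiv (t0 + 6) 9

theorem pvFd (t0 t : Int) (h1 : t0 ≤ t) (h2 : t ≤ t0 + 6)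
    (hfd : PySem.Int.floordiv t0 9 = PySem.Int.floordiv (t0+6) 9) :
    PySem.Int.floordiv t 9 = PySem.Int.floordiv t0 9 := by
  rw [PySem.Int.floordiv_eq_ediv_of_pos (by norm_num), PySem.Int.floordiv_eq_ediv_of_pos (by norm_num)]
  rw [PySem.Int.floordiv_eq_ediv_of_pos (by norm_num), PySem.Int.floordiv_eq_ediv_of_pos (by norm_num)] at hfd
  omega

theorem pvLt27 (t0 t : Int) (h1 : t0 ≤ t) (h2 : t ≤ t0 + 6) (hlt : t0 < 27)
    (hfd : PySem.Int.floordiv t0 9 = PySem.Int.floordiv (t0+6) 9) : t < 27 := by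
  rw [PySem.Int.floordiv_eq_ediv_of_pos (by norm_num), PySem.Int.floordiv_eq_ediv_of_pos (by norm_num)] at hfd
  omega

-- members of hand, given sorted hand = pvRun2 t0
theorem pvMem_iff (hand : List Int) (t0 : Int)
    (hs : PySem.List.sorted hand (fun x => x) false = pvRun2 t0) :
    ∀ x, x ∈ hand ↔ x ∈ pvRun2 t0 := by
  intro x
  rw [← hs, PySem.List.mem_sorted]

theorem pvCount_eq (hand : List Int) (t0 : Int)
    (hs : PySem.List.sorted hand (fun x => x) false = pvRun2 t0) :
    ∀ x, hand.count x = (pvRun2 t0).count x := by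
  intro x
  have hp : (PySem.List.sorted hand (fun x => x) false).Perm hand := PySem.List.sorted_perm _ _ _
  rw [← hs]
  exact (hp.count_eq x).symm

-- B implies A's sorted-dedup list is the plain run
theorem pvGood_tset (hand : List Int) (t0 : Int)
    (hs : PySem.List.sorted hand (fun x => x) false = pvRun2 t0) :
    PySem.List.sorted (PySem.Set.ofList hand) (fun x => x) false = pvRun t0 := by
  apply PySem.List.sorted_eq_of_perm_of_pairwise_lt
  · rw [List.perm_ext_iff_of_nodup (by simp [pvRun]) (PySem.Set.nodup_ofList hand)]
    intro x
    rw [PySem.Set.mem_ofList, pvMem_iff hand t0 hs x]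
    simp [pvRun, pvRun2]
  · simp [pvRun]

-- A with the first two guards passed, zeta-reduced
theorem pvA_body (hand : List Int) (hsp : is_seven_pairs hand = true)
    (hq : is_qing_yi_se hand [] = true) :
    check_seven_fairies hand =
      (if (PySem.List.sorted (PySem.Set.ofList hand) (fun x => x) false).length ≠ 7 then false
       else if (PySem.List.sorted (PySem.Set.ofList hand) (fun x => x) false).any
              (fun t => decide (PySem.Int.floordiv t 9
                ≠ PySem.Int.floordiv (PySem.List.pyGetD (PySem.List.sorted (PySem.Set.ofList hand) (fun x => x) false) 0 0) 9)) then false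
       else if PySem.Int.mod (PySem.List.pyGetD (PySem.List.sorted (PySem.Set.ofList hand) (fun x => x) false) (-1) 0) 9
                - PySem.Int.mod (PySem.List.pyGetD (PySem.List.sorted (PySem.Set.ofList hand) (fun x => x) false) 0 0) 9 == 6
              && (PySem.List.sorted (PySem.Set.ofList hand) (fun x => x) false).length == 7 then true
       else false) := by
  unfold check_seven_fairies
  rw [hsp, hq]
  rfl

theorem pvA_false1 (hand : List Int) (hsp : is_seven_pairs hand = false) :
    check_seven_fairies hand = false := by
  unfold check_seven_fairies
  rw [hsp]
  rfl

theorem pvA_false2 (hand : List Int) (hq : is_qing_yi_se hand [] = false) :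
    check_seven_fairies hand = false := by
  unfold check_seven_fairies
  rw [hq]
  cases is_seven_pairs hand <;> rfl

theorem pvA_iff (hand : List Int) :
    check_seven_fairies hand = true ↔ hand.length = 14 ∧ ∃ t0, pvGood hand t0 := by
  constructor
  · -- A = true → characterization
    intro h
    cases hsp : is_seven_pairs hand with
    | false => rw [pvA_false1 hand hsp] at h; cases h
    | true =>
    cases hq : is_qing_yi_se hand [] with
    | false => rw [pvA_false2 hand hq] at h; cases h
    | true =>
    rw [pvA_body hand hsp hq] at h
    obtain ⟨h14, hcnt⟩ := (pvSevenPairs_iff hand).mp hsp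
    obtain ⟨hne, h27, q, hsuit⟩ := (pvQing_iff hand).mp hq
    have hpw : (PySem.List.sorted (PySem.Set.ofList hand) (fun x => x) false).Pairwise (· < ·) :=
      PySem.List.sorted_ofList_pairwise_lt hand
    have hmem : ∀ x, x ∈ PySem.List.sorted (PySem.Set.ofList hand) (fun x => x) false ↔ x ∈ hand := by
      intro x; rw [PySem.List.mem_sorted, PySem.Set.mem_ofList]
    by_cases hlen7 : (PySem.List.sorted (PySem.Set.ofList hand) (fun x => x) false).length = 7
    swap
    · rw [if_pos hlen7] at h; cases h
    rw [if_neg (by omega)] at h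
    obtain ⟨a, b, c, d, e, f, g, hts⟩ := pvLen7 _ hlen7
    rw [hts] at hpw h
    simp only [hts] at hmem
    by_cases hany : (([a,b,c,d,e,f,g] : List Int).any
        (fun t => decide (PySem.Int.floordiv t 9
          ≠ PySem.Int.floordiv (PySem.List.pyGetD ([a,b,c,d,e,f,g] : List Int) 0 0) 9))) = true
    · rw [if_pos hany] at h; cases h
    rw [if_neg hany] at h
    by_cases hcond : (PySem.Int.mod (PySem.List.pyGetD ([a,b,c,d,e,f,g] : List Int) (-1) 0) 9
          - PySem.Int.mod (PySem.List.pyGetD ([a,b,c,d,e,f,g] : List Int) 0 0) 9 == (6:Int)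
        && ([a,b,c,d,e,f,g] : List Int).length == 7) = true
    swap
    · rw [if_neg hcond] at h; cases h
    clear h hany
    simp [List.pairwise_cons] at hpw
    have hma : a ∈ hand := (hmem a).mp (by simp)
    have hmg : g ∈ hand := (hmem g).mp (by simp)
    have hfa := hsuit a hma
    have hfg := hsuit g hmg
    -- the mod test gives g - a = 6
    have hga : g - a = 6 := by
      have h1 := PySem.Int.floordiv_mul_add_mod a 9
      have h2 := PySem.Int.floordiv_mul_add_mod g 9
      have hgl : PySem.List.pyGetD ([a,b,c,d,e,f,g] : List Int) (-1) 0 = g := rfl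
      have hal : PySem.List.pyGetD ([a,b,c,d,e,f,g] : List Int) 0 0 = a := rfl
      rw [hgl, hal, Bool.and_eq_true, beq_iff_eq] at hcond
      rw [hfa] at h1
      rw [hfg] at h2
      omega
    -- strict increase forces the consecutive run
    obtain ⟨hb, hc', hd, he, hf, hg2⟩ : b = a+1 ∧ c = a+2 ∧ d = a+3 ∧ e = a+4 ∧ f = a+5 ∧ g = a+6 := by
      obtain ⟨⟨h1,h2,h3,h4,h5,h6⟩,⟨h7,h8,h9,h10,h11⟩,⟨h12,h13,h14',h15⟩,⟨h16,h17,h18⟩,⟨h19,h20⟩,h21⟩ := hpw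
      omega
    subst hb hc' hd he hf hg2
    -- counts: seven distinct values, counts in {2,4}, total 14 ⇒ all counts are 2
    have hsum : hand.count a + hand.count (a+1) + hand.count (a+2) + hand.count (a+3)
        + hand.count (a+4) + hand.count (a+5) + hand.count (a+6) = 14 := by
      have hperm : hand.dedup.Perm [a,a+1,a+2,a+3,a+4,a+5,a+6] := by
        rw [List.perm_ext_iff_of_nodup hand.nodup_dedup (by simp)]
        intro x
        rw [List.mem_dedup, ← hmem x]
      have hsum0 := List.sum_map_count_dedup_eq_length hand
      rw [List.Perm.sum_eq (hperm.map hand.count)] at hsum0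
      simp only [List.map_cons, List.map_nil, List.sum_cons, List.sum_nil] at hsum0
      omega
    have hca := hcnt a hma
    have hc1 := hcnt (a+1) ((hmem _).mp (by simp))
    have hc2 := hcnt (a+2) ((hmem _).mp (by simp))
    have hc3 := hcnt (a+3) ((hmem _).mp (by simp))
    have hc4 := hcnt (a+4) ((hmem _).mp (by simp))
    have hc5 := hcnt (a+5) ((hmem _).mp (by simp))
    have hc6 := hcnt (a+6) ((hmem _).mp (by simp))
    -- hand is a permutation of the doubled run
    have hperm2 : (pvRun2 a).Perm hand := by
      rw [List.perm_iff_count]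
      intro x
      rw [pvRun2_count]
      by_cases hx : x = a ∨ x = a+1 ∨ x = a+2 ∨ x = a+3 ∨ x = a+4 ∨ x = a+5 ∨ x = a+6
      · rw [if_pos hx]
        rcases hx with rfl|rfl|rfl|rfl|rfl|rfl|rfl <;> omega
      · rw [if_neg hx]
        symm
        rw [List.count_eq_zero]
        intro hxh
        have := (hmem x).mpr hxh
        simp at this
        omega
    have hsorted : PySem.List.sorted hand (fun x => x) false = pvRun2 a := by
      exact PySem.List.sorted_id_eq_of_perm_of_pairwise _ _ hperm2 (by simp [pvRun2])
    refine ⟨h14, a, hsorted, h27 a hma, by rw [hfa, hfg]⟩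
  · -- characterization → A = true
    rintro ⟨h14, t0, hg⟩
    obtain ⟨hs, hlt, hfd⟩ := hg
    have hmem := pvMem_iff hand t0 hs
    have hcount := pvCount_eq hand t0 hs
    have hma : t0 ∈ hand := (hmem t0).mpr (by simp [pvRun2])
    have hbnd : ∀ t ∈ hand, t0 ≤ t ∧ t ≤ t0 + 6 := by
      intro t ht
      have := (hmem t).mp ht
      simp [pvRun2] at this
      omega
    have hsp : is_seven_pairs hand = true := by
      rw [pvSevenPairs_iff]
      refine ⟨h14, fun k hk => ?_⟩
      left
      rw [hcount k, pvRun2_count]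
      rw [if_pos (by have := (hmem k).mp hk; simp [pvRun2] at this; omega)]
    have hq : is_qing_yi_se hand [] = true := by
      rw [pvQing_iff]
      refine ⟨by intro h0; subst h0; simp at hma,
        fun t ht => pvLt27 t0 t (hbnd t ht).1 (hbnd t ht).2 hlt hfd,
        PySem.Int.floordiv t0 9,
        fun t ht => pvFd t0 t (hbnd t ht).1 (hbnd t ht).2 hfd⟩
    have hts := pvGood_tset hand t0 hs
    rw [pvA_body hand hsp hq, hts]
    rw [if_neg (by simp [pvRun])]
    have h0get : PySem.List.pyGetD (pvRun t0) 0 0 = t0 := rfl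
    have hany : ((pvRun t0).any
        (fun t => decide (PySem.Int.floordiv t 9
          ≠ PySem.Int.floordiv (PySem.List.pyGetD (pvRun t0) 0 0) 9))) = false := by
      rw [h0get, List.any_eq_false]
      intro t ht
      simp only [pvRun, List.mem_cons, List.not_mem_nil, or_false] at ht
      simp only [decide_eq_true_eq, ne_eq, not_not]
      exact pvFd t0 t (by omega) (by omega) hfd
    rw [if_neg (by rw [hany]; simp)]
    have hcond : (PySem.Int.mod (PySem.List.pyGetD (pvRun t0) (-1) 0) 9
          - PySem.Int.mod (PySem.List.pyGetD (pvRun t0) 0 0) 9 == (6:Int)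
        && (pvRun t0).length == 7) = true := by
      have hgl : PySem.List.pyGetD (pvRun t0) (-1) 0 = t0 + 6 := rfl
      rw [hgl, h0get, Bool.and_eq_true, beq_iff_eq]
      have h1 := PySem.Int.floordiv_mul_add_mod t0 9
      have h2 := PySem.Int.floordiv_mul_add_mod (t0+6) 9
      rw [hfd] at h1
      exact ⟨by omega, by rfl⟩
    rw [if_pos hcond]

theorem pvB_iff (hand : List Int) :
    check_seven_fairies_alt hand = true ↔ hand.length = 14 ∧ ∃ t0, pvGood hand t0 := by
  unfold check_seven_fairies_alt
  simp only [pvExpected_eq]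
  split_ifs with h1 h2 h3
  · simp; omega
  · constructor
    · intro h; exact absurd h (by simp)
    · rintro ⟨-, t0, hs, hlt, -⟩
      exfalso
      have ht0 : PySem.List.pyGetD (PySem.List.sorted hand (fun x => x) false) 0 0 = t0 := by
        rw [hs]; rfl
      rw [ht0] at h2; omega
  · constructor
    · intro h; exact absurd h (by simp)
    · rintro ⟨-, t0, hs, -, hfd⟩
      exfalso
      have ht0 : PySem.List.pyGetD (PySem.List.sorted hand (fun x => x) false) 0 0 = t0 := by
        rw [hs]; rfl
      rw [ht0] at h3; exact h3 hfd
  · constructor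
    · intro h
      have hs := beq_iff_eq.mp h
      exact ⟨by omega, _, hs, by omega, by omega⟩
    · rintro ⟨-, t0, hs, -, -⟩
      have ht0 : PySem.List.pyGetD (PySem.List.sorted hand (fun x => x) false) 0 0 = t0 := by
        rw [hs]; rfl
      rw [ht0]
      exact beq_iff_eq.mpr hs

-- ===== VERDICT (by name: the statement is the Claim_ definition above) =====
theorem check_seven_fairies_spec : Claim_equal_check_seven_fairies := by
  intro hand _
  unfold Spec_check_seven_fairies
  cases hA : check_seven_fairies hand
  · cases hB : check_seven_fairies_alt hand
    · rfl
    · exact absurd ((pvA_iff hand).mpr ((pvB_iff hand).mp hB)) (by simp [hA])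
  · exact ((pvB_iff hand).mpr ((pvA_iff hand).mp hA)).symm
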